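-- pv_equiv track=rewrite | github.com/factorem1337/NPA | npa.py | generate_level_n_set
-- ===== SOURCE A (Python) =====
-- def simplify_product_advanced(product_str):
--     """
--     Simplifies an operator product string with correct commutation rules.
--     - Operators from different parties (A, B) commute.
--     - Operators from the same party (A1, A2) DO NOT commute.
--     """
--     operators = [op for op in product_str.split() if op != "Id"]
--     if not operators:
--         return "Id"
--
--     # 1. Group operators by party, maintaining original relative order.
--     party_groups = {}
--     for op in operators:
--         party = op[0]
--         if party not in party_groups:
--             party_groups[party] = []
--         party_groups[party].append(op)
--
--     # 2. For each party, simplify adjacent O^2=I pairs iteratively.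
--     for party, op_list in party_groups.items():
--         simplified = True
--         while simplified:
--             simplified = False
--             if len(op_list) < 2:
--                 break
--             next_op_list = []
--             i = 0
--             while i < len(op_list):
--                 if i + 1 < len(op_list) and op_list[i] == op_list[i+1]:
--                     i += 2
--                     simplified = True
--                 else:
--                     next_op_list.append(op_list[i])
--                     i += 1
--             op_list = next_op_list
--         party_groups[party] = op_list
--
--     # 3. Recombine party groups in canonical order (A then B).
--     final_ops = []
--     for party in sorted(party_groups.keys()):
--         final_ops.extend(party_groups[party])
--
--     if not final_ops:
--         return "Id"
--     return " ".join(final_ops)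
--
-- def generate_level_n_set(base_operators, level):
--     """Generates the full operator set up to a given integer level 'n'."""
--     identity = "Id"
--     if level == 0:
--         return {identity}
--
--     operator_set = {identity}
--     operator_set.update(base_operators)
--
--     current_level_products = set(base_operators)
--     for _ in range(1, level):
--         next_level_products = set()
--         for op1 in current_level_products:
--             for op2 in base_operators:
--                 product_str = f"{op1} {op2}"
--                 simplified = simplify_product_advanced(product_str)
--                 next_level_products.add(simplified)
--         operator_set.update(next_level_products)
--         current_level_products = next_level_products
--
--     return operator_set
-- ===== SOURCE B (Python) =====
-- def _stack_simplify(product_str):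
--     # One pass: per-party stacks; an operator cancels with the stack top (O^2 = I).
--     groups = {}
--     for op in product_str.split():
--         if op == "Id":
--             continue
--         stack = groups.setdefault(op[0], [])
--         if stack and stack[-1] == op:
--             stack.pop()
--         else:
--             stack.append(op)
--     out = []
--     for party in sorted(groups):
--         out.extend(groups[party])
--     return " ".join(out) if out else "Id"
--
--
-- def generate_level_n_set(base_operators, level):
--     """Generates the full operator set up to a given integer level 'n'."""
--     if level == 0:
--         return {"Id"}
--     operator_set = {"Id"}
--     operator_set.update(base_operators)
--     current = set(base_operators)
--     for _ in range(1, level):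
--         current = {_stack_simplify(op1 + " " + op2)
--                    for op1 in current for op2 in base_operators}
--         operator_set |= current
--     return operator_set
-- ===== Notes on version B (the rewrite author's own statement) =====
-- stated objective: alternative
-- what changed: simplification of a product is done in one pass with a stack per party (an operator cancels against the stack top), replacing A's group-then-repeat-adjacent-pair-passes fixpoint loop
import Mathlib
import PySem

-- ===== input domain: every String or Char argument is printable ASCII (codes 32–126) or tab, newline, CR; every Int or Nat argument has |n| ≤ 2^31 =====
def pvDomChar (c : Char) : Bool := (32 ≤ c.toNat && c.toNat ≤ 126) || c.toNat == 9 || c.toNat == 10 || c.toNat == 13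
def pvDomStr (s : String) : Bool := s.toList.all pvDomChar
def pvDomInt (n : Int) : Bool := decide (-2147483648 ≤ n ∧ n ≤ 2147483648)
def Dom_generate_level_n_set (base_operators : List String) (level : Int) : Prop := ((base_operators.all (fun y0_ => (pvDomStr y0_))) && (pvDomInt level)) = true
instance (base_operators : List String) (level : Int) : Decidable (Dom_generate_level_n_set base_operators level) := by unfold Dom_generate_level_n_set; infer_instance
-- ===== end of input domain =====

-- B replaces A's per-party repeated adjacent-pair cancellation passes by a single
-- stack pass per party: same results, one pass instead of a fixpoint loop.

-- ===== PORT A =====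
-- op[0]: tokens produced by str.split() are nonempty, so pyGet? is always `some`; the default is never used
def pvParty (op : String) : Char := (PySem.Str.pyGet? op 0).getD ' '

-- one scan of the inner while loop: skips adjacent equal pairs, flag = whether any pair was skipped
def pvPassA : List String → List String × Bool
  | [] => ([], false)
  | [a] => ([a], false)
  | a :: b :: t =>
    if a = b then ((pvPassA t).1, true)
    else (a :: (pvPassA (b :: t)).1, (pvPassA (b :: t)).2)

theorem pvPassA_length (l : List String) :
    (pvPassA l).1.length + (if (pvPassA l).2 then 2 else 0) ≤ l.length := by
  fun_induction pvPassA l with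
  | case1 => simp
  | case2 a => simp
  | case3 b t ih =>
    simp only [pvPassA, if_pos rfl]
    split at ih <;> simp_all <;> omega
  | case4 a b t h ih =>
    simp only [pvPassA, if_neg h]
    split at ih <;> split <;> simp_all <;> omega

-- the `while simplified:` loop of A (re-checks len < 2 each round, as the Python does)
def pvCancelLoop (l : List String) : List String :=
  if l.length < 2 then l
  else
    if (pvPassA l).2 then pvCancelLoop (pvPassA l).1 else (pvPassA l).1
termination_by l.length
decreasing_by
  have h := pvPassA_length l
  rename_i hflag
  simp [hflag] at h
  omega

def simplify_product_advanced (product_str : String) : String :=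
  let operators := (PySem.Str.split₀ product_str).filter (fun op => op ≠ "Id")
  if operators = [] then "Id"
  else
    let party_groups : PySem.Dict Char (List String) :=
      operators.foldl
        (fun d op => d.insert (pvParty op) (d.getD (pvParty op) [] ++ [op]))
        PySem.Dict.empty
    let party_groups2 :=
      party_groups.items.foldl (fun d kv => d.insert kv.1 (pvCancelLoop kv.2)) party_groups
    let final_ops :=
      (PySem.List.sorted party_groups2.keys (fun x => x) false).foldl
        (fun acc p => acc ++ party_groups2.getD p []) []
    if final_ops = [] then "Id" else PySem.Str.join " " final_ops

def generate_level_n_set (base_operators : List String) (level : Int) : List String :=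
  let identity := "Id"
  if level = 0 then PySem.Set.ofList [identity]
  else
    let operator_set := PySem.Set.update (PySem.Set.ofList [identity]) base_operators
    let current := PySem.Set.ofList base_operators
    let st :=
      (PySem.List.pyRange 1 level 1).foldl
        (fun (st : PySem.Set String × PySem.Set String) _ =>
          let next :=
            st.2.foldl
              (fun n op1 =>
                base_operators.foldl
                  (fun n op2 =>
                    PySem.Set.add n (simplify_product_advanced (op1 ++ " " ++ op2)))
                  n)
              PySem.Set.empty
          (PySem.Set.update st.1 next, next))
        (operator_set, current)
    st.1

-- ===== PORT B =====
-- `if stack and stack[-1] == op: stack.pop() else: stack.append(op)`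
def pvPush (st : List String) (op : String) : List String :=
  if st.getLast? = some op then st.dropLast else st ++ [op]

def pvStackSimplify (product_str : String) : String :=
  let groups : PySem.Dict Char (List String) :=
    (PySem.Str.split₀ product_str).foldl
      (fun d op =>
        if op = "Id" then d
        else d.insert (pvParty op) (pvPush (d.getD (pvParty op) []) op))
      PySem.Dict.empty
  let out :=
    (PySem.List.sorted groups.keys (fun x => x) false).foldl
      (fun acc p => acc ++ groups.getD p []) []
  if out = [] then "Id" else PySem.Str.join " " out

def generate_level_n_set_alt (base_operators : List String) (level : Int) : List String :=
  if level = 0 then PySem.Set.ofList ["Id"]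
  else
    let operator_set := PySem.Set.update (PySem.Set.ofList ["Id"]) base_operators
    let current := PySem.Set.ofList base_operators
    let st :=
      (PySem.List.pyRange 1 level 1).foldl
        (fun (st : PySem.Set String × PySem.Set String) _ =>
          let current' :=
            st.2.foldl
              (fun n op1 =>
                base_operators.foldl
                  (fun n op2 =>
                    PySem.Set.add n (pvStackSimplify (op1 ++ " " ++ op2)))
                  n)
              PySem.Set.empty
          (PySem.Set.update st.1 current', current'))
        (operator_set, current)
    st.1

-- ===== PRECONDITION & SPEC =====
def Spec_generate_level_n_set (base_operators : List String) (level : Int) (out : List String) : Prop := out = generate_level_n_set_alt base_operators level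
instance (base_operators : List String) (level : Int) (out : List String) : Decidable (Spec_generate_level_n_set base_operators level out) := by unfold Spec_generate_level_n_set; infer_instance

-- ===== CLAIM (what is proved, stated in full; the proofs are below) =====
def Claim_equal_generate_level_n_set : Prop := ∀ (base_operators : List String) (level : Int), Dom_generate_level_n_set base_operators level → Spec_generate_level_n_set base_operators level (generate_level_n_set base_operators level)

-- ===== LEMMAS AND PROOFS =====

-- front-of-list version of the per-party stack step (pvPush works at the Python list's end)
def pvStep (stk : List String) (x : String) : List String :=
  match stk with
  | [] => [x]
  | t :: ts => if t = x then ts else x :: t :: ts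

theorem pvPush_rev (s : List String) (x : String) :
    pvPush s.reverse x = (pvStep s x).reverse := by
  cases s with
  | nil => simp [pvPush, pvStep]
  | cons t ts =>
    by_cases h : t = x <;>
      simp [pvPush, pvStep, h, List.getLast?_concat, List.dropLast_concat]

theorem pvFoldl_push_rev (l : List String) :
    ∀ s : List String, List.foldl pvPush s.reverse l = (List.foldl pvStep s l).reverse := by
  induction l with
  | nil => intro s; simp
  | cons x xs ih =>
    intro s
    simp only [List.foldl_cons, pvPush_rev]
    exact ih (pvStep s x)

theorem pvStep_inv {stk : List String} (h : stk.IsChain (· ≠ ·)) (x : String) :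
    (pvStep stk x).IsChain (· ≠ ·) := by
  cases stk with
  | nil => simp [pvStep]
  | cons t ts =>
    by_cases hx : t = x
    · simpa [pvStep, hx] using h.tail
    · simpa [pvStep, hx, List.isChain_cons_cons] using ⟨fun e => hx e.symm, h⟩

theorem pvStep_step_self {stk : List String} (h : stk.IsChain (· ≠ ·)) (x : String) :
    pvStep (pvStep stk x) x = stk := by
  cases stk with
  | nil => simp [pvStep]
  | cons t ts =>
    by_cases hx : t = x
    · subst hx
      cases ts with
      | nil => simp [pvStep]
      | cons u us =>
        have htu : u ≠ t := Ne.symm (List.isChain_cons_cons.mp h).1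
        simp [pvStep, htu]
    · simp [pvStep, hx]

theorem pvFoldl_step_pass (l : List String) :
    ∀ stk : List String, stk.IsChain (· ≠ ·) →
      List.foldl pvStep stk (pvPassA l).1 = List.foldl pvStep stk l := by
  fun_induction pvPassA l with
  | case1 => intro stk _; rfl
  | case2 a => intro stk _; rfl
  | case3 b t ih =>
    intro stk hstk
    simp only [pvPassA, if_pos rfl, List.foldl_cons]
    rw [pvStep_step_self hstk]
    exact ih stk hstk
  | case4 a b t h ih =>
    intro stk hstk
    simp only [pvPassA, if_neg h, List.foldl_cons]
    exact ih (pvStep stk a) (pvStep_inv hstk a)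

theorem pvPassA_false (l : List String) :
    (pvPassA l).2 = false → (pvPassA l).1 = l ∧ l.IsChain (· ≠ ·) := by
  fun_induction pvPassA l with
  | case1 => simp
  | case2 a => simp
  | case3 b t ih => simp [pvPassA]
  | case4 a b t hab ih =>
    simp only [pvPassA, if_neg hab]
    intro hf
    rcases ih hf with ⟨h1, h2⟩
    exact ⟨by rw [h1], List.isChain_cons_cons.mpr ⟨hab, h2⟩⟩

theorem pvFoldl_step_chain (l : List String) (hl : l.IsChain (· ≠ ·)) :
    ∀ stk : List String, (∀ x, stk.head? = some x → l.head? ≠ some x) →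
      List.foldl pvStep stk l = l.reverse ++ stk := by
  induction l with
  | nil => intro stk _; simp
  | cons x xs ih =>
    intro stk hj
    have hstep : pvStep stk x = x :: stk := by
      cases stk with
      | nil => rfl
      | cons t ts =>
        have : t ≠ x := by
          intro e
          exact hj t rfl (by simp [e])
        simp [pvStep, this]
    simp only [List.foldl_cons, hstep]
    have hchain : xs.IsChain (· ≠ ·) := hl.tail
    have hj' : ∀ y, (x :: stk).head? = some y → xs.head? ≠ some y := by
      intro y hy hxy
      cases xs with
      | nil => simp at hxy
      | cons u us =>
        simp at hy hxy
        exact (List.isChain_cons_cons.mp hl).1 (by rw [hy, hxy])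
    rw [ih hchain (x :: stk) hj']
    simp

theorem pvCancel_eq_stack (l : List String) :
    pvCancelLoop l = (List.foldl pvStep [] l).reverse := by
  suffices H : ∀ n (l : List String), l.length ≤ n →
      pvCancelLoop l = (List.foldl pvStep [] l).reverse from H l.length l le_rfl
  intro n
  induction n with
  | zero =>
    intro l hl
    have : l = [] := List.eq_nil_of_length_eq_zero (Nat.le_zero.mp hl)
    subst this
    simp [pvCancelLoop]
  | succ n ih =>
    intro l hl
    rw [pvCancelLoop]
    by_cases hlen : l.length < 2
    · match l, hlen with
      | [], _ => simp [pvCancelLoop]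
      | [a], _ => simp [pvCancelLoop, pvStep]
    · rw [if_neg hlen]
      have hlen' := pvPassA_length l
      cases hflag : (pvPassA l).2 with
      | true =>
        rw [if_pos rfl]
        rw [ih (pvPassA l).1 (by rw [hflag] at hlen'; simp at hlen'; omega)]
        rw [pvFoldl_step_pass l [] (by simp)]
      | false =>
        rw [if_neg (by simp)]
        rcases pvPassA_false l hflag with ⟨h1, h2⟩
        rw [h1, pvFoldl_step_chain l h2 [] (by simp)]
        simp

theorem pvFoldl_skip_id (f : PySem.Dict Char (List String) → String → PySem.Dict Char (List String))
    (l : List String) :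
    ∀ d, l.foldl (fun d op => if op = "Id" then d else f d op) d
      = (l.filter (fun op => op ≠ "Id")).foldl f d := by
  induction l with
  | nil => intro d; rfl
  | cons x xs ih =>
    intro d
    by_cases hx : x = "Id" <;> simp [List.filter_cons, hx, ih]

theorem pvGetD_GA (ops : List String) :
    ∀ (d : PySem.Dict Char (List String)) (p : Char),
      (ops.foldl (fun d op => d.insert (pvParty op) (d.getD (pvParty op) [] ++ [op])) d).getD p []
        = d.getD p [] ++ ops.filter (fun op => pvParty op = p) := by
  induction ops with
  | nil => intro d p; simp
  | cons op t ih =>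
    intro d p
    simp only [List.foldl_cons, ih, PySem.Dict.getD_insert, List.filter_cons]
    by_cases hp : p = pvParty op
    · simp [hp]
    · have hp' : ¬pvParty op = p := fun e => hp e.symm
      simp [hp, hp']

theorem pvGetD_GB (ops : List String) :
    ∀ (d : PySem.Dict Char (List String)) (p : Char),
      (ops.foldl (fun d op => d.insert (pvParty op) (pvPush (d.getD (pvParty op) []) op)) d).getD p []
        = List.foldl pvPush (d.getD p []) (ops.filter (fun op => pvParty op = p)) := by
  induction ops with
  | nil => intro d p; simp
  | cons op t ih =>
    intro d p
    simp only [List.foldl_cons, ih, PySem.Dict.getD_insert, List.filter_cons]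
    by_cases hp : p = pvParty op
    · simp [hp]
    · have hp' : ¬pvParty op = p := fun e => hp e.symm
      simp [hp, hp']

theorem pvFoldl_insert_getD (ks : List Char) (h : Char → List String) :
    ∀ (d : PySem.Dict Char (List String)) (p : Char), ks.Nodup →
      (ks.foldl (fun d k => d.insert k (h k)) d).getD p []
        = if p ∈ ks then h p else d.getD p [] := by
  induction ks with
  | nil => intro d p _; simp
  | cons k t ih =>
    intro d p hnd
    simp only [List.foldl_cons]
    rw [ih _ p (List.nodup_cons.mp hnd).2]
    by_cases hp : p = k
    · subst hp
      have hpt : p ∉ t := (List.nodup_cons.mp hnd).1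
      simp [hpt, PySem.Dict.getD_insert]
    · by_cases hpt : p ∈ t <;> simp [hp, hpt, PySem.Dict.getD_insert]

theorem pvUpdate_subset {s : List Char} (xs : List Char) (h : ∀ x ∈ xs, x ∈ s) :
    PySem.Set.update s xs = s := by
  induction xs generalizing s with
  | nil => rfl
  | cons x t ih =>
    have hadd : PySem.Set.add s x = s := by
      have hx : x ∈ s := h x (by simp)
      simp [PySem.Set.add, hx]
    calc PySem.Set.update s (x :: t) = PySem.Set.update (PySem.Set.add s x) t := rfl
      _ = PySem.Set.update s t := by rw [hadd]
      _ = s := ih (fun y hy => h y (by simp [hy]))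

theorem pvSimplify_eq (s : String) : simplify_product_advanced s = pvStackSimplify s := by
  unfold simplify_product_advanced pvStackSimplify
  rw [pvFoldl_skip_id]
  generalize (List.filter (fun op => decide (op ≠ "Id")) (PySem.Str.split₀ s)) = ops
  by_cases hnil : ops = []
  · simp [hnil, PySem.List.sorted_eq_nil_iff]
  · simp only [if_neg hnil]
    set GA := List.foldl (fun d op => d.insert (pvParty op) (d.getD (pvParty op) [] ++ [op]))
      PySem.Dict.empty ops with hGA
    set GB := List.foldl (fun d op => d.insert (pvParty op) (pvPush (d.getD (pvParty op) []) op))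
      PySem.Dict.empty ops with hGB
    set A2 := List.foldl (fun d kv => d.insert kv.1 (pvCancelLoop kv.2)) GA GA.items with hA2
    have hnodGA : GA.keys.Nodup := by
      rw [hGA]
      exact PySem.Dict.nodup_keys_foldl_insert_key _ _ _ _ PySem.Dict.nodup_keys_empty
    have hkeysAB : GA.keys = GB.keys := by
      rw [hGA, hGB, PySem.Dict.keys_foldl_insert_key, PySem.Dict.keys_foldl_insert_key]
    have hA2eq : A2 = List.foldl (fun d k => d.insert k (pvCancelLoop (GA.getD k []))) GA GA.keys := by
      rw [hA2, PySem.Dict.items_eq_map_keys GA hnodGA ([] : List String), List.foldl_map]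
    have hkeysA2 : A2.keys = GA.keys := by
      rw [hA2eq, PySem.Dict.keys_foldl_insert]
      exact pvUpdate_subset _ (fun x hx => hx)
    have hgetA2 : ∀ p ∈ GA.keys, A2.getD p [] = pvCancelLoop (GA.getD p []) := by
      intro p hp
      rw [hA2eq, pvFoldl_insert_getD _ _ _ _ hnodGA, if_pos hp]
    have hval : ∀ p, pvCancelLoop (GA.getD p []) = GB.getD p [] := by
      intro p
      rw [hGA, hGB, pvGetD_GA, pvGetD_GB]
      simp only [PySem.Dict.getD_empty, List.nil_append]
      have h2 := pvFoldl_push_rev (ops.filter (fun op => decide (pvParty op = p))) []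
      simp only [List.reverse_nil] at h2
      rw [pvCancel_eq_stack, ← h2]
    have hfin : List.foldl (fun acc p => acc ++ A2.getD p []) []
          (PySem.List.sorted A2.keys (fun x => x) false)
        = List.foldl (fun acc p => acc ++ GB.getD p []) []
          (PySem.List.sorted GB.keys (fun x => x) false) := by
      rw [hkeysA2, hkeysAB]
      apply PySem.List.foldl_congr_mem
      intro acc p hp
      have hpk : p ∈ GA.keys := by
        rw [hkeysAB]
        exact (PySem.List.mem_sorted _ _ _ _).mp hp
      rw [hgetA2 p hpk, hval p]
    rw [hfin]

-- ===== VERDICT (by name: the statement is the Claim_ definition above) =====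
theorem generate_level_n_set_spec : Claim_equal_generate_level_n_set := by
  intro base level _h
  unfold Spec_generate_level_n_set generate_level_n_set generate_level_n_set_alt
  simp only [pvSimplify_eq]
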